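-- pv_equiv track=rewrite | github.com/abbasmoosajee07/AdventofCode | 2024/10/2024Day10.py | find_distinct_trails
-- ===== SOURCE A (Python) =====
-- from collections import deque
--
-- def find_distinct_trails(grid, start):
--     rows, cols = len(grid), len(grid[0])  # Dimensions of the grid
--     directions = [(-1, 0), (1, 0), (0, -1), (0, 1)]  # Neighbor directions (up, down, left, right)
--
--     # Queue to store current paths; each item is a path (list of cells)
--     queue = deque([[start]])
--     distinct_trails = []  # List to store all distinct trails
--
--     while queue:
--         current_path = queue.popleft()  # Dequeue the current trail
--         current_cell = current_path[-1]  # Get the last cell in the current path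
--         row, col = current_cell
--         pos_height = grid[row][col]  # Height of the current position
--
--         # If the last cell in the trail has value 9, store this trail
--         if pos_height == 9:
--             distinct_trails.append(current_path)
--
--         # Explore neighbors to extend the trail
--         for dr, dc in directions:
--             r, c = row + dr, col + dc
--             if 0 <= r < rows and 0 <= c < cols:  # Check bounds
--                 next_height = grid[r][c]
--                 diff_height = next_height - pos_height
--
--                 # Move to the neighbor if the height difference constraint is satisfied
--                 if diff_height == 1:
--                     # Prevent revisiting the same cell within the same path
--                     if (r, c) not in current_path:
--                         # Extend the current path
--                         new_path = current_path + [(r, c)]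
--                         queue.append(new_path)
--
--     return distinct_trails
-- ===== SOURCE B (Python) =====
-- def find_distinct_trails(grid, start):
--     rows, cols = len(grid), len(grid[0])
--     directions = [(-1, 0), (1, 0), (0, -1), (0, 1)]
--     trails = []
--
--     def extend(path):
--         row, col = path[-1]
--         height = grid[row][col]
--         if height == 9:
--             trails.append(path)
--         for dr, dc in directions:
--             r, c = row + dr, col + dc
--             if 0 <= r < rows and 0 <= c < cols and grid[r][c] - height == 1 and (r, c) not in path:
--                 extend(path + [(r, c)])
--
--     extend([start])
--     return trails
-- ===== Notes on version B (the rewrite author's own statement) =====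
-- stated objective: idiomatic
-- what changed: A's FIFO queue of partial paths (breadth-first enumeration) is replaced by a recursive depth-first `extend(path)` helper over the same neighbour order; since every recorded trail has the same length, DFS preorder emits the trails in exactly A's BFS order.
-- outside the precondition, e.g. on find_distinct_trails([[5, 5], [7]], (0, 0)): A returns [], B returns []
import Mathlib
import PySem

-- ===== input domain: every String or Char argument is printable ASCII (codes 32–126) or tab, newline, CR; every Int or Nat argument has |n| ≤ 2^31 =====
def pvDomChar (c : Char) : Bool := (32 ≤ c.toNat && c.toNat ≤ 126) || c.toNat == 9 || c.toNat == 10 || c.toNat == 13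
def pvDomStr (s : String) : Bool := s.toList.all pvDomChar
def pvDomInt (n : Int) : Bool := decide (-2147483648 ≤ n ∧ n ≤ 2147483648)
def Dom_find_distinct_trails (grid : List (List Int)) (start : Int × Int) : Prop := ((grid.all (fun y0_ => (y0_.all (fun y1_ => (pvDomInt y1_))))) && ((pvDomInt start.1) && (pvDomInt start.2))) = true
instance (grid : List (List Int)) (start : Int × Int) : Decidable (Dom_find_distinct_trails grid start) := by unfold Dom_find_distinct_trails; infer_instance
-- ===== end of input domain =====

-- B replaces A's FIFO queue of partial paths by a recursive DFS `extend` over the same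
-- neighbour order; all recorded trails have equal length, so the output order coincides.

-- ===== PORT A =====

def pvAt (grid : List (List Int)) (r c : Int) : Option Int :=
  (PySem.List.pyGet? grid r).bind (fun row => PySem.List.pyGet? row c)

def pvDirs : List (Int × Int) := [(-1, 0), (1, 0), (0, -1), (0, 1)]

def pvCand (grid : List (List Int)) (rows cols row col ph : Int)
    (p : List (Int × Int)) (d : Int × Int) : Option (List (Int × Int)) :=
  let r := row + d.1
  let c := col + d.2
  if 0 ≤ r ∧ r < rows ∧ 0 ≤ c ∧ c < cols then
    match pvAt grid r c with
    | some nh => if nh - ph = 1 ∧ (r, c) ∉ p then some (p ++ [(r, c)]) else none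
    | none => none
  else none

def pvPushA (grid : List (List Int)) (rows cols row col ph : Int)
    (p : List (Int × Int)) : List (List (Int × Int)) :=
  pvDirs.foldl (fun acc d => acc ++ (pvCand grid rows cols row col ph p d).toList) []

-- cells a path may ever contain: the raw start tuple plus the in-bounds positions
def pvCellList (rows cols : Int) (start : Int × Int) : List (Int × Int) :=
  start :: ((List.range rows.toNat) ×ˢ (List.range cols.toNat)).map
    (fun rc => ((rc.1 : Int), (rc.2 : Int)))

abbrev pvInvP (rows cols : Int) (start : Int × Int) (p : List (Int × Int)) : Prop :=
  p ≠ [] ∧ p.Nodup ∧ ∀ x ∈ p, x ∈ pvCellList rows cols start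

def pvN (rows cols : Int) (start : Int × Int) : Nat := (pvCellList rows cols start).length

def pvW (N : Nat) (p : List (Int × Int)) : Nat := 5 ^ (N + 1 - p.length)

def pvQW (N : Nat) (q : List (List (Int × Int))) : Nat := (q.map (pvW N)).sum

theorem pvInvP_length_le {rows cols : Int} {start : Int × Int} {p : List (Int × Int)}
    (h : pvInvP rows cols start p) : p.length ≤ pvN rows cols start := by
  obtain ⟨-, hnd, hmem⟩ := h
  exact (hnd.subperm hmem).length_le

theorem pvPushA_mem {grid : List (List Int)} {rows cols row col ph : Int}
    {p q : List (Int × Int)} (h : q ∈ pvPushA grid rows cols row col ph p) :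
    ∃ rc : Int × Int, q = p ++ [rc] ∧ 0 ≤ rc.1 ∧ rc.1 < rows ∧ 0 ≤ rc.2 ∧ rc.2 < cols ∧
      rc ∉ p ∧ pvAt grid rc.1 rc.2 = some (ph + 1) := by
  rw [pvPushA, PySem.List.foldl_append_eq_flatMap] at h
  simp only [List.nil_append, List.mem_flatMap, Option.mem_toList] at h
  obtain ⟨d, -, hd⟩ := h
  rw [pvCand] at hd
  split at hd
  · split at hd
    · rename_i nh hnh
      split at hd
      · rename_i hcond
        refine ⟨(row + d.1, col + d.2), ?_⟩
        simp_all
        omega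
      · exact absurd hd (by simp)
    · exact absurd hd (by simp)
  · exact absurd hd (by simp)

theorem pvPushA_length_le (grid : List (List Int)) (rows cols row col ph : Int)
    (p : List (Int × Int)) : (pvPushA grid rows cols row col ph p).length ≤ 4 := by
  rw [pvPushA, PySem.List.foldl_append_eq_flatMap]
  simp only [List.nil_append, List.length_flatMap, pvDirs]
  have : ∀ d, ((pvCand grid rows cols row col ph p d).toList).length ≤ 1 := by
    intro d; cases pvCand grid rows cols row col ph p d <;> simp
  simp only [List.map]
  have h1 := this (-1, 0); have h2 := this (1, 0); have h3 := this (0, -1); have h4 := this (0, 1)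
  simp only [List.sum_cons, List.sum_nil]
  omega

theorem pvQW_step {rows cols : Int} {start : Int × Int} {grid : List (List Int)}
    {row col ph : Int} {p : List (Int × Int)} (hp : pvInvP rows cols start p)
    (rest : List (List (Int × Int))) :
    pvQW (pvN rows cols start) (rest ++ pvPushA grid rows cols row col ph p)
      < pvQW (pvN rows cols start) (p :: rest) := by
  set N := pvN rows cols start with hN
  have hlen : p.length ≤ N := pvInvP_length_le hp
  have hw : ∀ x ∈ (pvPushA grid rows cols row col ph p).map (pvW N),
      x ≤ 5 ^ (N - p.length) := by
    intro x hx
    obtain ⟨q, hq, hxq⟩ := List.mem_map.mp hx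
    obtain ⟨rc, hqe, -⟩ := pvPushA_mem hq
    subst hxq hqe
    simp only [pvW, List.length_append, List.length_singleton]
    have : N + 1 - (p.length + 1) = N - p.length := by omega
    rw [this]
  have hsum : pvQW N (pvPushA grid rows cols row col ph p) ≤ 4 * 5 ^ (N - p.length) := by
    have h1 := List.sum_le_card_nsmul ((pvPushA grid rows cols row col ph p).map (pvW N))
      (5 ^ (N - p.length)) hw
    have h2 := pvPushA_length_le grid rows cols row col ph p
    simp only [List.length_map, smul_eq_mul] at h1
    calc pvQW N (pvPushA grid rows cols row col ph p)
        ≤ (pvPushA grid rows cols row col ph p).length * 5 ^ (N - p.length) := h1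
      _ ≤ 4 * 5 ^ (N - p.length) := by
          exact Nat.mul_le_mul_right _ h2
  have hwp : pvW N p = 5 * 5 ^ (N - p.length) := by
    simp only [pvW]
    have : N + 1 - p.length = (N - p.length) + 1 := by omega
    rw [this, pow_succ]
    ring
  have hpos : 0 < 5 ^ (N - p.length) := Nat.pow_pos (by norm_num)
  simp only [pvQW, List.map_append, List.sum_append, List.map_cons, List.sum_cons] at *
  omega

theorem pvQW_cons_lt {N : Nat} (p : List (Int × Int)) (rest : List (List (Int × Int))) :
    pvQW N rest < pvQW N (p :: rest) := by
  simp only [pvQW, List.map_cons, List.sum_cons]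
  have : 0 < pvW N p := Nat.pow_pos (by norm_num)
  omega

theorem pvMem_cellList {rows cols : Int} {start : Int × Int} {r c : Int}
    (h0r : 0 ≤ r) (hr : r < rows) (h0c : 0 ≤ c) (hc : c < cols) :
    (r, c) ∈ pvCellList rows cols start := by
  refine List.mem_cons_of_mem _ (List.mem_map.mpr ⟨(r.toNat, c.toNat), ?_, ?_⟩)
  · exact List.pair_mem_product.mpr ⟨List.mem_range.mpr (by omega), List.mem_range.mpr (by omega)⟩
  · simp [Int.toNat_of_nonneg h0r, Int.toNat_of_nonneg h0c]

theorem pvInvP_push {grid : List (List Int)} {rows cols : Int} {start : Int × Int}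
    {row col ph : Int} {p q : List (Int × Int)} (hp : pvInvP rows cols start p)
    (hq : q ∈ pvPushA grid rows cols row col ph p) : pvInvP rows cols start q := by
  obtain ⟨rc, hqe, h0r, hr, h0c, hc, hnin, -⟩ := pvPushA_mem hq
  subst hqe
  obtain ⟨hne, hnd, hmem⟩ := hp
  refine ⟨by simp, ?_, ?_⟩
  · refine List.Nodup.append hnd (List.nodup_singleton _) (fun a ha hb => ?_)
    simp only [List.mem_singleton] at hb
    subst hb
    exact hnin ha
  · intro x hx
    rcases List.mem_append.mp hx with h | h
    · exact hmem x h
    · simp only [List.mem_singleton] at h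
      subst h
      exact pvMem_cellList h0r hr h0c hc

theorem pvInvP_single (rows cols : Int) (start : Int × Int) :
    pvInvP rows cols start [start] :=
  ⟨by simp, List.nodup_singleton _, by simp [pvCellList]⟩

-- ===== PORT A : BFS over a queue of paths (literal port of the while-loop) =====
def pvBFS (grid : List (List Int)) (rows cols : Int) (start : Int × Int)
    (queue : List (List (Int × Int))) (acc : List (List (Int × Int)))
    (hq : ∀ p ∈ queue, pvInvP rows cols start p) : List (List (Int × Int)) :=
  match queue with
  | [] => acc
  | current_path :: rest =>
    match PySem.List.pyGet? current_path (-1) with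
    | none =>      -- unreachable: enqueued paths are never empty
      pvBFS grid rows cols start rest acc (fun p hp => hq p (List.mem_cons_of_mem _ hp))
    | some (row, col) =>
      match pvAt grid row col with
      | none =>    -- Python raises IndexError here; outside Pre_
        pvBFS grid rows cols start rest acc (fun p hp => hq p (List.mem_cons_of_mem _ hp))
      | some pos_height =>
        pvBFS grid rows cols start
          (rest ++ pvPushA grid rows cols row col pos_height current_path)
          (acc ++ (if pos_height = 9 then [current_path] else []))
          (fun p hp => by
            rcases List.mem_append.mp hp with h | h
            · exact hq p (List.mem_cons_of_mem _ h)
            · exact pvInvP_push (hq _ List.mem_cons_self) h)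
termination_by pvQW (pvN rows cols start) queue
decreasing_by
  all_goals first
    | exact pvQW_step (hq _ List.mem_cons_self) _
    | exact pvQW_cons_lt _ _

-- ===== PORT B : recursive DFS (literal port of Source B's `extend`) =====
mutual
def pvExtend (grid : List (List Int)) (rows cols : Int) (start : Int × Int)
    (path : List (Int × Int)) (hp : pvInvP rows cols start path) :
    List (List (Int × Int)) :=
  match PySem.List.pyGet? path (-1) with
  | none => []   -- unreachable: path is never empty
  | some (row, col) =>
    match pvAt grid row col with
    | none => []  -- Python raises IndexError here; outside Pre_
    | some height =>
      (if height = 9 then [path] else []) ++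
        pvExtendDirs grid rows cols start path row col height pvDirs hp
termination_by 5 * (pvN rows cols start + 1 - path.length) + 5
decreasing_by
  simp only [pvDirs, List.length_cons, List.length_nil]
  omega

def pvExtendDirs (grid : List (List Int)) (rows cols : Int) (start : Int × Int)
    (path : List (Int × Int)) (row col height : Int) (dirs : List (Int × Int))
    (hp : pvInvP rows cols start path) : List (List (Int × Int)) :=
  match dirs with
  | [] => []
  | d :: rest =>
    let r := row + d.1
    let c := col + d.2
    (if hb : 0 ≤ r ∧ r < rows ∧ 0 ≤ c ∧ c < cols then
      match pvAt grid r c with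
      | none => []  -- Python raises IndexError here; outside Pre_
      | some nh =>
        if hgood : nh - height = 1 ∧ (r, c) ∉ path then
          pvExtend grid rows cols start (path ++ [(r, c)]) (by
            obtain ⟨hne, hnd, hmem⟩ := hp
            refine ⟨by simp, ?_, ?_⟩
            · refine List.Nodup.append hnd (List.nodup_singleton _) (fun a ha hb' => ?_)
              simp only [List.mem_singleton] at hb'
              subst hb'
              exact hgood.2 ha
            · intro x hx
              rcases List.mem_append.mp hx with h | h
              · exact hmem x h
              · simp only [List.mem_singleton] at h
                subst h
                exact pvMem_cellList hb.1 hb.2.1 hb.2.2.1 hb.2.2.2)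
        else []
    else []) ++ pvExtendDirs grid rows cols start path row col height rest hp
termination_by 5 * (pvN rows cols start + 1 - path.length) + dirs.length
decreasing_by
  · have hlen : path.length ≤ pvN rows cols start := pvInvP_length_le hp
    simp only [List.length_append, List.length_singleton]
    simp only [List.length_cons]
    omega
  · simp only [List.length_cons]
    omega
end

-- Port of A: BFS with a FIFO queue of partial paths
def find_distinct_trails (grid : List (List Int)) (start : Int × Int) :
    List (List (Int × Int)) :=
  let rows : Int := grid.length
  let cols : Int := (grid.headD []).length   -- len(grid[0]); grid = [] raises, outside Pre_
  pvBFS grid rows cols start [[start]] []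
    (fun p hp => by
      simp only [List.mem_singleton] at hp
      subst hp
      exact pvInvP_single rows cols start)

-- Port of B: recursive DFS from the start cell
def find_distinct_trails_alt (grid : List (List Int)) (start : Int × Int) :
    List (List (Int × Int)) :=
  let rows : Int := grid.length
  let cols : Int := (grid.headD []).length
  pvExtend grid rows cols start [start] (pvInvP_single rows cols start)

-- Pre_: A raises IndexError on `grid[0]` for an empty grid, on a start index outside
-- Python's wraparound range, and on ragged grids whose rows can be shorter than row 0
-- (a neighbour access grid[r][c] with c < len(grid[0]) can then fail); rows at least as
-- long as row 0 are harmless and stay inside.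
def Pre_find_distinct_trails (grid : List (List Int)) (start : Int × Int) : Prop :=
  PySem.Raise.InRange grid.length start.1 ∧
  (∀ row ∈ grid, (grid.headD []).length ≤ row.length) ∧
  PySem.Raise.InRange (PySem.List.pyGetD grid start.1 []).length start.2

instance (grid : List (List Int)) (start : Int × Int) :
    Decidable (Pre_find_distinct_trails grid start) := by
  unfold Pre_find_distinct_trails; infer_instance

def pvWitness_find_distinct_trails : List (List Int) × (Int × Int) := ([[8, 9]], (0, 0))

def Spec_find_distinct_trails (grid : List (List Int)) (start : Int × Int)
    (out : List (List (Int × Int))) : Prop := out = find_distinct_trails_alt grid start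
instance (grid : List (List Int)) (start : Int × Int) (out : List (List (Int × Int))) :
    Decidable (Spec_find_distinct_trails grid start out) := by
  unfold Spec_find_distinct_trails; infer_instance

-- ===== CLAIM (what is proved, stated in full; the proofs are below) =====
def Claim_equal_find_distinct_trails : Prop := ∀ (grid : List (List Int)) (start : Int × Int), Dom_find_distinct_trails grid start → Pre_find_distinct_trails grid start → Spec_find_distinct_trails grid start (find_distinct_trails grid start)

-- ===== LEMMAS AND PROOFS =====

-- ===== proof-side characterisations =====
def pvRecOf (grid : List (List Int)) (p : List (Int × Int)) : List (List (Int × Int)) :=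
  match PySem.List.pyGet? p (-1) with
  | none => []
  | some (row, col) =>
    match pvAt grid row col with
    | none => []
    | some ph => if ph = 9 then [p] else []

def pvChOf (grid : List (List Int)) (rows cols : Int) (p : List (Int × Int)) :
    List (List (Int × Int)) :=
  match PySem.List.pyGet? p (-1) with
  | none => []
  | some (row, col) =>
    match pvAt grid row col with
    | none => []
    | some ph => pvPushA grid rows cols row col ph p

def pvHeightOf (grid : List (List Int)) (p : List (Int × Int)) : Option Int :=
  (PySem.List.pyGet? p (-1)).bind (fun rc => pvAt grid rc.1 rc.2)

def pvDFS (grid : List (List Int)) (rows cols : Int) (start : Int × Int)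
    (p : List (Int × Int)) : List (List (Int × Int)) :=
  if h : pvInvP rows cols start p then pvExtend grid rows cols start p h else []

def pvBFS' (grid : List (List Int)) (rows cols : Int) (start : Int × Int)
    (q : List (List (Int × Int))) : List (List (Int × Int)) :=
  if h : ∀ p ∈ q, pvInvP rows cols start p then pvBFS grid rows cols start q [] h else []

theorem pvBFS_acc (grid : List (List Int)) (rows cols : Int) (start : Int × Int) :
    ∀ (n : Nat) (q : List (List (Int × Int))) (acc : List (List (Int × Int)))
      (h : ∀ p ∈ q, pvInvP rows cols start p), pvQW (pvN rows cols start) q ≤ n →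
      pvBFS grid rows cols start q acc h = acc ++ pvBFS grid rows cols start q [] h := by
  intro n
  induction n with
  | zero =>
    intro q acc h hn
    cases q with
    | nil => simp [pvBFS]
    | cons p rest =>
      exfalso
      have := pvQW_cons_lt (N := pvN rows cols start) p rest
      omega
  | succ n ih =>
    intro q acc h hn
    cases q with
    | nil => simp [pvBFS]
    | cons p rest =>
      rw [pvBFS, pvBFS]
      cases hL : PySem.List.pyGet? p (-1) with
      | none =>
        simp only
        have hlt := pvQW_cons_lt (N := pvN rows cols start) p rest
        rw [ih rest acc _ (by omega), ih rest [] _ (by omega)]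
        try simp
      | some rc =>
        obtain ⟨row, col⟩ := rc
        simp only
        cases hA : pvAt grid row col with
        | none =>
          simp only
          have hlt := pvQW_cons_lt (N := pvN rows cols start) p rest
          rw [ih rest acc _ (by omega), ih rest [] _ (by omega)]
          try simp
        | some ph =>
          simp only
          have hlt := pvQW_step (grid := grid) (row := row) (col := col) (ph := ph)
            (h _ List.mem_cons_self) rest
          rw [ih _ _ _ (by omega), ih _ ([] ++ _) _ (by omega)]
          try simp

theorem pvChOf_inv {grid : List (List Int)} {rows cols : Int} {start : Int × Int}
    {p q : List (Int × Int)} (hp : pvInvP rows cols start p)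
    (hq : q ∈ pvChOf grid rows cols p) : pvInvP rows cols start q := by
  rw [pvChOf] at hq
  split at hq
  · simp at hq
  · split at hq
    · simp at hq
    · exact pvInvP_push hp hq

theorem pvInv_queue_step {grid : List (List Int)} {rows cols : Int} {start : Int × Int}
    {p : List (Int × Int)} {rest : List (List (Int × Int))}
    (hq : ∀ p' ∈ p :: rest, pvInvP rows cols start p') :
    ∀ q ∈ rest ++ pvChOf grid rows cols p, pvInvP rows cols start q := by
  intro q hmem
  rcases List.mem_append.mp hmem with h | h
  · exact hq q (List.mem_cons_of_mem _ h)
  · exact pvChOf_inv (hq p List.mem_cons_self) h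

theorem pvBFS'_nil (grid : List (List Int)) (rows cols : Int) (start : Int × Int) :
    pvBFS' grid rows cols start [] = [] := by
  rw [pvBFS', dif_pos (by simp)]
  simp [pvBFS]

theorem pvBFS'_cons {grid : List (List Int)} {rows cols : Int} {start : Int × Int}
    {p : List (Int × Int)} {rest : List (List (Int × Int))}
    (hq : ∀ p' ∈ p :: rest, pvInvP rows cols start p') :
    pvBFS' grid rows cols start (p :: rest) =
      pvRecOf grid p ++ pvBFS' grid rows cols start (rest ++ pvChOf grid rows cols p) := by
  rw [pvBFS', dif_pos hq, pvBFS', dif_pos (pvInv_queue_step hq), pvBFS]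
  cases hL : PySem.List.pyGet? p (-1) with
  | none =>
    simp only [pvRecOf, pvChOf, hL, List.append_nil, List.nil_append]
  | some rc =>
    obtain ⟨row, col⟩ := rc
    simp only
    cases hA : pvAt grid row col with
    | none =>
      simp only [pvRecOf, pvChOf, hL, hA, List.append_nil, List.nil_append]
    | some ph =>
      simp only [pvRecOf, pvChOf, hL, hA]
      rw [pvBFS_acc grid rows cols start (pvQW (pvN rows cols start) _) _ _ _ le_rfl]
      simp

theorem pvBFS'_restructure (grid : List (List Int)) (rows cols : Int) (start : Int × Int) :
    ∀ (A B : List (List (Int × Int))), (∀ p ∈ A ++ B, pvInvP rows cols start p) →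
      pvBFS' grid rows cols start (A ++ B) =
        A.flatMap (pvRecOf grid) ++
          pvBFS' grid rows cols start (B ++ A.flatMap (pvChOf grid rows cols)) := by
  intro A
  induction A with
  | nil => intro B h; simp
  | cons p A' ih =>
    intro B h
    have h' : ∀ p' ∈ p :: (A' ++ B), pvInvP rows cols start p' := by
      intro p' hp'
      rcases List.mem_cons.mp hp' with h1 | h1
      · exact h p' (by simp [h1])
      · exact h p' (by simpa using List.mem_cons_of_mem p h1)
    rw [List.cons_append, pvBFS'_cons h']
    have h'' : ∀ p' ∈ A' ++ (B ++ pvChOf grid rows cols p), pvInvP rows cols start p' := by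
      intro p' hp'
      rcases List.mem_append.mp hp' with h1 | h1
      · exact h p' (by simp [h1])
      · rcases List.mem_append.mp h1 with h2 | h2
        · exact h p' (by simp [h2])
        · exact pvChOf_inv (h p (by simp)) h2
    rw [show (A' ++ B) ++ pvChOf grid rows cols p = A' ++ (B ++ pvChOf grid rows cols p) by
      simp, ih _ h'']
    simp [List.flatMap_cons]

theorem pvExtendDirs_eq (grid : List (List Int)) (rows cols : Int) (start : Int × Int)
    (path : List (Int × Int)) (row col ph : Int) :
    ∀ (dirs : List (Int × Int)) (hp : pvInvP rows cols start path),
      pvExtendDirs grid rows cols start path row col ph dirs hp =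
        (dirs.flatMap (fun d => (pvCand grid rows cols row col ph path d).toList)).flatMap
          (pvDFS grid rows cols start) := by
  intro dirs
  induction dirs with
  | nil => intro hp; rw [pvExtendDirs]; simp
  | cons d rest ih =>
    intro hp
    rw [pvExtendDirs]
    simp only [List.flatMap_cons, List.flatMap_append]
    rw [ih hp]
    congr 1
    rw [pvCand]
    split
    · rename_i hb
      cases hA : pvAt grid (row + d.1) (col + d.2) with
      | none => simp
      | some nh =>
        simp only
        split
        · rename_i hgood
          simp only [Option.toList_some, List.flatMap_cons, List.flatMap_nil, List.append_nil,
            pvDFS]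
          rw [dif_pos]
        · simp
    · simp

theorem pvPushA_eq_flatMap (grid : List (List Int)) (rows cols row col ph : Int)
    (p : List (Int × Int)) :
    pvPushA grid rows cols row col ph p =
      pvDirs.flatMap (fun d => (pvCand grid rows cols row col ph p d).toList) := by
  rw [pvPushA, PySem.List.foldl_append_eq_flatMap, List.nil_append]

theorem pvDFS_eq {grid : List (List Int)} {rows cols : Int} {start : Int × Int}
    {p : List (Int × Int)} (hp : pvInvP rows cols start p) :
    pvDFS grid rows cols start p =
      pvRecOf grid p ++
        (pvChOf grid rows cols p).flatMap (pvDFS grid rows cols start) := by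
  rw [pvDFS, dif_pos hp, pvExtend]
  cases hL : PySem.List.pyGet? p (-1) with
  | none => simp [pvRecOf, pvChOf, hL]
  | some rc =>
    obtain ⟨row, col⟩ := rc
    simp only
    cases hA : pvAt grid row col with
    | none => simp [pvRecOf, pvChOf, hL, hA]
    | some ph =>
      simp only [pvRecOf, pvChOf, hL, hA]
      rw [pvExtendDirs_eq, pvPushA_eq_flatMap]

theorem pvRecOf_ne {grid : List (List Int)} {p : List (Int × Int)} {H : Int}
    (hH : pvHeightOf grid p = some H) (h9 : H ≠ 9) : pvRecOf grid p = [] := by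
  rw [pvHeightOf] at hH
  rw [pvRecOf]
  cases hL : PySem.List.pyGet? p (-1) with
  | none => rw [hL] at hH
  | some rc =>
    obtain ⟨row, col⟩ := rc
    rw [hL] at hH
    simp only [Option.bind_some] at hH
    simp [hH, h9]

theorem pvRecOf_9 {grid : List (List Int)} {p : List (Int × Int)}
    (hH : pvHeightOf grid p = some 9) : pvRecOf grid p = [p] := by
  rw [pvHeightOf] at hH
  rw [pvRecOf]
  cases hL : PySem.List.pyGet? p (-1) with
  | none => rw [hL] at hH; simp at hH
  | some rc =>
    obtain ⟨row, col⟩ := rc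
    rw [hL] at hH
    simp only [Option.bind_some] at hH
    simp [hH]

theorem pvChOf_spec {grid : List (List Int)} {rows cols : Int} {start : Int × Int}
    {p q : List (Int × Int)} {H : Int} (hp : pvInvP rows cols start p)
    (hH : pvHeightOf grid p = some H) (hq : q ∈ pvChOf grid rows cols p) :
    pvInvP rows cols start q ∧ q.length = p.length + 1 ∧
      pvHeightOf grid q = some (H + 1) := by
  refine ⟨pvChOf_inv hp hq, ?_⟩
  rw [pvHeightOf] at hH
  rw [pvChOf] at hq
  cases hL : PySem.List.pyGet? p (-1) with
  | none => rw [hL] at hq; simp at hq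
  | some rc =>
    obtain ⟨row, col⟩ := rc
    rw [hL] at hq
    rw [hL] at hH
    simp only [Option.bind_some] at hH
    simp only [hH] at hq
    obtain ⟨rc', hqe, -, -, -, -, -, hat⟩ := pvPushA_mem hq
    subst hqe
    refine ⟨by simp, ?_⟩
    rw [pvHeightOf, PySem.List.pyGet?_neg_one_append_singleton]
    simpa using hat

theorem pvDFS_empty {grid : List (List Int)} {rows cols : Int} {start : Int × Int} :
    ∀ (n : Nat) (p : List (Int × Int)) (H : Int),
      pvN rows cols start + 1 - p.length ≤ n → pvInvP rows cols start p →
      pvHeightOf grid p = some H → 9 < H → pvDFS grid rows cols start p = [] := by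
  intro n
  induction n with
  | zero =>
    intro p H hn hp hH h9
    have := pvInvP_length_le hp
    omega
  | succ n ih =>
    intro p H hn hp hH h9
    rw [pvDFS_eq hp, pvRecOf_ne hH (by omega), List.nil_append]
    rw [List.flatMap_eq_nil_iff]
    intro q hq
    obtain ⟨hq1, hq2, hq3⟩ := pvChOf_spec hp hH hq
    have := pvInvP_length_le hq1
    exact ih q (H + 1) (by omega) hq1 hq3 (by omega)

theorem pvBFS'_empty {grid : List (List Int)} {rows cols : Int} {start : Int × Int} :
    ∀ (n : Nat) (q : List (List (Int × Int))),
      pvQW (pvN rows cols start) q ≤ n →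
      (∀ p ∈ q, pvInvP rows cols start p) →
      (∀ p ∈ q, ∃ H, pvHeightOf grid p = some H ∧ 9 < H) →
      pvBFS' grid rows cols start q = [] := by
  intro n
  induction n with
  | zero =>
    intro q hn hq hh
    cases q with
    | nil => exact pvBFS'_nil _ _ _ _
    | cons p rest =>
      have := pvQW_cons_lt (N := pvN rows cols start) p rest
      omega
  | succ n ih =>
    intro q hn hq hh
    cases q with
    | nil => exact pvBFS'_nil _ _ _ _
    | cons p rest =>
      obtain ⟨H, hH, h9⟩ := hh p List.mem_cons_self
      rw [pvBFS'_cons hq, pvRecOf_ne hH (by omega), List.nil_append]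
      have hinv' := pvInv_queue_step (grid := grid) hq
      have hmeas : pvQW (pvN rows cols start) (rest ++ pvChOf grid rows cols p) ≤ n := by
        have : pvQW (pvN rows cols start) (rest ++ pvChOf grid rows cols p)
            < pvQW (pvN rows cols start) (p :: rest) := by
          rw [pvChOf]
          cases hL : PySem.List.pyGet? p (-1) with
          | none =>
            simpa using pvQW_cons_lt (N := pvN rows cols start) p rest
          | some rc =>
            obtain ⟨row, col⟩ := rc
            simp only
            cases hA : pvAt grid row col with
            | none => simpa using pvQW_cons_lt (N := pvN rows cols start) p rest
            | some ph => exact pvQW_step (hq _ List.mem_cons_self) rest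
        omega
      refine ih _ hmeas hinv' ?_
      intro p' hp'
      rcases List.mem_append.mp hp' with h1 | h1
      · exact hh p' (List.mem_cons_of_mem _ h1)
      · obtain ⟨-, -, hh'⟩ := pvChOf_spec (hq p List.mem_cons_self) hH h1
        exact ⟨H + 1, hh', by omega⟩

theorem pvLevelHigh {grid : List (List Int)} {rows cols : Int} {start : Int × Int}
    {H : Int} {q : List (List (Int × Int))}
    (hq : ∀ p ∈ q, pvInvP rows cols start p)
    (hh : ∀ p ∈ q, pvHeightOf grid p = some H) (h9 : 9 < H) :
    pvBFS' grid rows cols start q = q.flatMap (pvDFS grid rows cols start) := by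
  rw [pvBFS'_empty (pvQW (pvN rows cols start) q) q le_rfl hq
    (fun p hp => ⟨H, hh p hp, h9⟩)]
  rw [eq_comm, List.flatMap_eq_nil_iff]
  intro p hp
  exact pvDFS_empty (pvN rows cols start + 1 - p.length) p H le_rfl (hq p hp) (hh p hp) h9

theorem pvLevel9 {grid : List (List Int)} {rows cols : Int} {start : Int × Int}
    {q : List (List (Int × Int))}
    (hq : ∀ p ∈ q, pvInvP rows cols start p)
    (hh : ∀ p ∈ q, pvHeightOf grid p = some 9) :
    pvBFS' grid rows cols start q = q.flatMap (pvDFS grid rows cols start) := by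
  have hch10 : ∀ p ∈ q, ∀ c ∈ pvChOf grid rows cols p,
      pvInvP rows cols start c ∧ pvHeightOf grid c = some 10 := by
    intro p hp c hc
    obtain ⟨h1, -, h3⟩ := pvChOf_spec (hq p hp) (hh p hp) hc
    exact ⟨h1, by norm_num at h3 ⊢; exact h3⟩
  have hstep := pvBFS'_restructure grid rows cols start q [] (by simpa using hq)
  rw [List.append_nil] at hstep
  rw [List.nil_append] at hstep
  rw [hstep]
  have hrec : ∀ p ∈ q, pvRecOf grid p = [p] := fun p hp => pvRecOf_9 (hh p hp)
  rw [List.flatMap_congr hrec]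
  have hempty : pvBFS' grid rows cols start (q.flatMap (pvChOf grid rows cols)) = [] := by
    refine pvBFS'_empty (pvQW (pvN rows cols start) _) _ le_rfl ?_ ?_
    · intro p hp
      obtain ⟨p', hp', hmem⟩ := List.mem_flatMap.mp hp
      exact (hch10 p' hp' p hmem).1
    · intro p hp
      obtain ⟨p', hp', hmem⟩ := List.mem_flatMap.mp hp
      exact ⟨10, (hch10 p' hp' p hmem).2, by omega⟩
  rw [hempty, List.append_nil]
  have hdfs : ∀ p ∈ q, pvDFS grid rows cols start p = [p] := by
    intro p hp
    rw [pvDFS_eq (hq p hp), pvRecOf_9 (hh p hp)]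
    have : ∀ c ∈ pvChOf grid rows cols p, pvDFS grid rows cols start c = [] := by
      intro c hc
      obtain ⟨h1, h3⟩ := hch10 p hp c hc
      exact pvDFS_empty (pvN rows cols start + 1 - c.length) c 10 le_rfl h1 h3 (by omega)
    rw [List.flatMap_congr this]
    simp
  rw [List.flatMap_congr hdfs]

theorem pvBFS'_eq_dfs {grid : List (List Int)} {rows cols : Int} {start : Int × Int} :
    ∀ (k : Nat) (H : Int) (q : List (List (Int × Int))),
      (∀ p ∈ q, pvInvP rows cols start p) →
      (∀ p ∈ q, pvHeightOf grid p = some H) →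
      (H < 9 → (9 - H).toNat ≤ k) →
      pvBFS' grid rows cols start q = q.flatMap (pvDFS grid rows cols start) := by
  intro k
  induction k with
  | zero =>
    intro H q hq hh hk
    rcases lt_trichotomy H 9 with h9 | h9 | h9
    · have := hk h9; omega
    · subst h9; exact pvLevel9 hq hh
    · exact pvLevelHigh hq hh h9
  | succ k ih =>
    intro H q hq hh hk
    rcases lt_trichotomy H 9 with h9 | h9 | h9
    · -- heights strictly below 9: nothing is recorded at this level on either side
      have hrec : ∀ p ∈ q, pvRecOf grid p = [] :=
        fun p hp => pvRecOf_ne (hh p hp) (by omega)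
      have hstep := pvBFS'_restructure grid rows cols start q [] (by simpa using hq)
      rw [List.append_nil, List.nil_append] at hstep
      rw [hstep]
      have hqch : ∀ p ∈ q.flatMap (pvChOf grid rows cols), pvInvP rows cols start p := by
        intro p hp
        obtain ⟨p', hp', hmem⟩ := List.mem_flatMap.mp hp
        exact (pvChOf_spec (hq p' hp') (hh p' hp') hmem).1
      have hhch : ∀ p ∈ q.flatMap (pvChOf grid rows cols), pvHeightOf grid p = some (H + 1) := by
        intro p hp
        obtain ⟨p', hp', hmem⟩ := List.mem_flatMap.mp hp
        exact (pvChOf_spec (hq p' hp') (hh p' hp') hmem).2.2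
      have h0 : q.flatMap (fun _ => ([] : List (List (Int × Int)))) = [] := by simp
      rw [List.flatMap_congr hrec, h0, List.nil_append]
      rw [ih (H + 1) _ hqch hhch (by intro h; have := hk h9; omega)]
      rw [List.flatMap_assoc]
      refine (List.flatMap_congr ?_).symm
      intro p hp
      rw [pvDFS_eq (hq p hp), pvRecOf_ne (hh p hp) (by omega), List.nil_append]
    · subst h9; exact pvLevel9 hq hh
    · exact pvLevelHigh hq hh h9

-- ===== VERDICT (by name: the statement is the Claim_ definition above) =====
theorem find_distinct_trails_spec : Claim_equal_find_distinct_trails := by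
  intro grid start hdom hpre
  unfold Spec_find_distinct_trails
  obtain ⟨h1, h2, h3⟩ := hpre
  set rows : Int := (grid.length : Int) with hrows
  set cols : Int := ((grid.headD []).length : Int) with hcols
  -- the start cell's height exists under Pre_
  have hrow : ∃ row, PySem.List.pyGet? grid start.1 = some row := by
    cases hx : PySem.List.pyGet? grid start.1 with
    | none => exact absurd h1 ((PySem.List.pyGet?_eq_none_iff _ _).mp hx)
    | some row => exact ⟨row, rfl⟩
  obtain ⟨row, hrow⟩ := hrow
  have hrowD : PySem.List.pyGetD grid start.1 [] = row := by
    simp [PySem.List.pyGetD, hrow]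
  rw [hrowD] at h3
  have hH : ∃ H, PySem.List.pyGet? row start.2 = some H := by
    cases hx : PySem.List.pyGet? row start.2 with
    | none => exact absurd h3 ((PySem.List.pyGet?_eq_none_iff _ _).mp hx)
    | some H => exact ⟨H, rfl⟩
  obtain ⟨H, hH⟩ := hH
  have hheight : pvHeightOf grid [start] = some H := by
    rw [pvHeightOf, PySem.List.pyGet?_neg_one]
    simp [pvAt, hrow, hH]
  have hinv : ∀ p ∈ [[start]], pvInvP rows cols start p := by
    intro p hp
    simp only [List.mem_singleton] at hp
    subst hp
    exact pvInvP_single rows cols start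
  have hmain := pvBFS'_eq_dfs (grid := grid) (rows := rows) (cols := cols) (start := start)
    (if H < 9 then (9 - H).toNat else 0) H [[start]] hinv
    (by intro p hp; simp only [List.mem_singleton] at hp; subst hp; exact hheight)
    (by intro h; simp [h])
  rw [pvBFS'] at hmain
  rw [dif_pos hinv] at hmain
  have hA : find_distinct_trails grid start = pvBFS grid rows cols start [[start]] [] hinv := by
    rw [find_distinct_trails]
  have hB : find_distinct_trails_alt grid start =
      pvExtend grid rows cols start [start] (pvInvP_single rows cols start) := by
    rw [find_distinct_trails_alt]
  rw [hA, hB, hmain]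
  simp only [List.flatMap_cons, List.flatMap_nil, List.append_nil]
  rw [pvDFS, dif_pos (pvInvP_single rows cols start)]
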